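-- pv_equiv track=rewrite | github.com/ravendinata/JACITA-Toku | helper/core.py | convert_t9
-- ===== SOURCE A (Python) =====
-- def convert_t9(string):
--     """
--     Convert a string to T9 format.
--
--     Parameters:
--     string : str
--         The string to convert.
--
--     Returns:
--     str
--         The string in T9 format.
--     """
--     t9 = {
--         'a': '2', 'b': '2', 'c': '2',
--         'd': '3', 'e': '3', 'f': '3',
--         'g': '4', 'h': '4', 'i': '4',
--         'j': '5', 'k': '5', 'l': '5',
--         'm': '6', 'n': '6', 'o': '6',
--         'p': '7', 'q': '7', 'r': '7', 's': '7',
--         't': '8', 'u': '8', 'v': '8',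
--         'w': '9', 'x': '9', 'y': '9', 'z': '9',
--         '0': '0', '1': '1', '2': '2', '3': '3', '4': '4',
--         '5': '5', '6': '6', '7': '7', '8': '8', '9': '9'
--     }
--
--     return ''.join([ t9.get(char, ".") for char in string.lower() ])
-- ===== SOURCE B (Python) =====
-- def convert_t9(string):
--     # No lookup table: compute the keypad digit arithmetically from the
--     # character code. Letters a..r fall in even groups of 3 starting at key 2;
--     # the 4-letter keys pqrs (s at offset 18) and wxyz (z at offset 25) are
--     # handled by shifting the offset before the division.
--     out = []
--     for ch in string.lower():
--         o = ord(ch)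
--         if 48 <= o <= 57:           # digit: unchanged
--             out.append(ch)
--         elif 97 <= o <= 122:        # lowercase letter: arithmetic group
--             k = o - 97
--             if k == 25:
--                 k -= 2
--             elif k >= 18:
--                 k -= 1
--             out.append(chr(50 + k // 3))
--         else:
--             out.append('.')
--     return ''.join(out)
-- ===== Notes on version B (the rewrite author's own statement) =====
-- stated objective: alternative
-- what changed: Replaces A's 36-entry char-to-digit dict with a closed-form arithmetic computation: the keypad digit is chr(50 + k//3) from the letter's alphabet offset k, with an offset shift for the 4-letter keys pqrs and wxyz; digits are kept and all other characters map to '.'.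
import Mathlib
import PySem

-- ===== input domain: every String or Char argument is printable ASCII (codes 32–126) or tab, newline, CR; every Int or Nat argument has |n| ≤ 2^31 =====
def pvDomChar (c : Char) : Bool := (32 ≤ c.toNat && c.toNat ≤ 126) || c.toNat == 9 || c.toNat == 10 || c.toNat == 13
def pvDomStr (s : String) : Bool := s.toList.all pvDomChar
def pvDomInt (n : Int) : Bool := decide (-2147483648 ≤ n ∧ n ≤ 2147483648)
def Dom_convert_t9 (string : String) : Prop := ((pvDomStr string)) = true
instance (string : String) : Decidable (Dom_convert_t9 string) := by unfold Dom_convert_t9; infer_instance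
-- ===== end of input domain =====

-- B computes the keypad digit arithmetically from the character code (no lookup
-- table): alternative decomposition, same cost; return-value equivalence.

-- ===== PORT A =====
def pvT9 : PySem.Dict Char String := PySem.Dict.ofList
  [('a',"2"),('b',"2"),('c',"2"),
   ('d',"3"),('e',"3"),('f',"3"),
   ('g',"4"),('h',"4"),('i',"4"),
   ('j',"5"),('k',"5"),('l',"5"),
   ('m',"6"),('n',"6"),('o',"6"),
   ('p',"7"),('q',"7"),('r',"7"),('s',"7"),
   ('t',"8"),('u',"8"),('v',"8"),
   ('w',"9"),('x',"9"),('y',"9"),('z',"9"),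
   ('0',"0"),('1',"1"),('2',"2"),('3',"3"),('4',"4"),
   ('5',"5"),('6',"6"),('7',"7"),('8',"8"),('9',"9")]

def convert_t9 (string : String) : String :=
  PySem.Str.join "" ((PySem.Str.lower string).toList.map (fun char => pvT9.getD char "."))

-- ===== PORT B =====
-- one character of B's loop body: ord/chr arithmetic, exact for ASCII chars
def pvEncode (ch : Char) : String :=
  let o := ch.toNat
  if 48 ≤ o ∧ o ≤ 57 then String.ofList [ch]
  else if 97 ≤ o ∧ o ≤ 122 then
    let k := o - 97
    let k := if k = 25 then k - 2 else if k ≥ 18 then k - 1 else k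
    String.ofList [Char.ofNat (50 + k / 3)]
  else "."

def convert_t9_alt (string : String) : String :=
  PySem.Str.join "" ((PySem.Str.lower string).toList.map pvEncode)

-- ===== PRECONDITION & SPEC =====
def Spec_convert_t9 (string : String) (out : String) : Prop := out = convert_t9_alt string
instance (string : String) (out : String) : Decidable (Spec_convert_t9 string out) := by unfold Spec_convert_t9; infer_instance

-- ===== CLAIM (what is proved, stated in full; the proofs are below) =====
def Claim_equal_convert_t9 : Prop := ∀ (string : String), Dom_convert_t9 string → Spec_convert_t9 string (convert_t9 string)

-- ===== LEMMAS AND PROOFS =====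

-- the dict lookup and the arithmetic encoding agree on every ASCII character
set_option maxRecDepth 8192 in
theorem pvChar_eq : ∀ n ∈ List.range 128, pvT9.getD (Char.ofNat n) "." = pvEncode (Char.ofNat n) := by
  decide

-- lowercasing keeps an ASCII character ASCII
set_option maxRecDepth 8192 in
theorem pvLower_lt : ∀ n ∈ List.range 128, (PySem.Chars.lowerChar (Char.ofNat n)).toNat < 128 := by
  decide

theorem pv_encode_eq (c : Char) (h : c.toNat < 128) : pvT9.getD c "." = pvEncode c := by
  have := pvChar_eq c.toNat (List.mem_range.mpr h)
  rwa [Char.ofNat_toNat] at this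

-- ===== VERDICT (by name: the statement is the Claim_ definition above) =====
set_option maxRecDepth 8192 in
theorem convert_t9_spec : Claim_equal_convert_t9 := by
  intro s hDom
  unfold Spec_convert_t9 convert_t9 convert_t9_alt
  congr 1
  have hlist : (PySem.Str.lower s).toList = s.toList.map PySem.Chars.lowerChar := by
    rw [PySem.Str.toList_lower]; rfl
  rw [hlist, List.map_map, List.map_map]
  apply List.map_congr_left
  intro d hd
  have hdom : pvDomChar d = true := List.all_eq_true.mp hDom d hd
  have hlt : d.toNat < 128 := by
    unfold pvDomChar at hdom
    simp only [Bool.or_eq_true, Bool.and_eq_true, decide_eq_true_eq, beq_iff_eq] at hdom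
    omega
  have hlo : (PySem.Chars.lowerChar d).toNat < 128 := by
    have := pvLower_lt d.toNat (List.mem_range.mpr hlt)
    rwa [Char.ofNat_toNat] at this
  exact pv_encode_eq _ hlo
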